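-- pv_equiv track=rewrite | github.com/diegobrnrd/algoritmos | fundamentos-de-problemas-computacionais-i/juvenal/14-quadrado.py | somar_linhas_colunas
-- ===== SOURCE A (Python) =====
-- def somar_linhas_colunas(n, quadrado, identificador):
--     if identificador == 'linha':
--         soma_das_linhas = [0] * n
--         for i, l in enumerate(quadrado):
--             for c in l:
--                 soma_das_linhas[i] += c
--         return soma_das_linhas
--
--     else:
--         soma_das_colunas = [0] * n
--         for l in quadrado:
--             for i, c in enumerate(l):
--                 soma_das_colunas[i] += c
--         return soma_das_colunas
-- ===== SOURCE B (Python) =====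
-- def somar_linhas_colunas(n, quadrado, identificador):
--     if identificador != 'linha':
--         quadrado = list(zip(*quadrado))
--     soma = [0] * n
--     for i, l in enumerate(quadrado):
--         soma[i] += sum(l)
--     return soma
-- ===== Notes on version B (the rewrite author's own statement) =====
-- stated objective: idiomatic
-- what changed: B unifies the two branches: the column case first transposes the matrix with zip(*quadrado) and then both cases run one single per-row accumulation soma[i] += sum(l), removing the per-entry index accumulation; Pre_ excludes inputs where A raises IndexError (negative n, or more rows/column entries than n) and, for the column case, ragged matrices with rows of unequal length, a shape the square-matrix task never specifies and on which A's accumulate-what-exists sums and B's zip-truncated sums are both defensible and differ.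
-- outside the precondition, e.g. on somar_linhas_colunas(2, [[1], [2, 3]], 'coluna'): A returns [3, 3], B returns [3, 0]; on somar_linhas_colunas(1, [[5], []], 'linha'): A returns [5], B raises IndexError
import Mathlib
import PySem

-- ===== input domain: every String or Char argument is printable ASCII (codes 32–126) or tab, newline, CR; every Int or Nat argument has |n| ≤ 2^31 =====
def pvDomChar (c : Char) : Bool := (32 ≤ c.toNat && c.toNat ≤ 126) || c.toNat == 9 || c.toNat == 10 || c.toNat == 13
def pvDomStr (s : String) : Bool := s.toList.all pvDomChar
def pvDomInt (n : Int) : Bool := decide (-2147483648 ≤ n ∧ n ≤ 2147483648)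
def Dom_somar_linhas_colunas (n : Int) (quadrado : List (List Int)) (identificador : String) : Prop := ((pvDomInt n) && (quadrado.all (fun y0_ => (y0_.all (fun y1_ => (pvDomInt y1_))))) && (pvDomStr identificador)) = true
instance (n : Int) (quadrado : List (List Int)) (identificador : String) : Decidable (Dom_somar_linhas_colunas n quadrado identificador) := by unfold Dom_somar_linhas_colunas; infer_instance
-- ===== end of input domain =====

-- B: the column case transposes the matrix first (zip(*quadrado)); both cases then share one
-- per-row accumulation soma[i] += sum(l). Objective: a unified, more idiomatic decomposition.


-- ===== PORT A =====
def somar_linhas_colunas (n : Int) (quadrado : List (List Int)) (identificador : String) : List Int :=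
  if identificador == "linha" then
    (PySem.List.enumerate quadrado 0).foldl
      (fun soma il =>
        il.2.foldl (fun s c => s.set il.1.toNat (s.getD il.1.toNat 0 + c)) soma)
      (List.replicate n.toNat 0)
  else
    quadrado.foldl
      (fun soma l =>
        (PySem.List.enumerate l 0).foldl
          (fun s ic => s.set ic.1.toNat (s.getD ic.1.toNat 0 + ic.2)) soma)
      (List.replicate n.toNat 0)

-- ===== PORT B =====
-- list(zip(*q)): exactly min(len(r)) tuples, the j-th holding each row's j-th entry
-- (r.getD j 0 = r[j] here since j < min length ≤ every row length).
def pyZipStar (q : List (List Int)) : List (List Int) :=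
  match (q.map List.length).min? with
  | none => []
  | some m => (List.range m).map (fun j => q.map (fun r => r.getD j 0))

def somar_linhas_colunas_alt (n : Int) (quadrado : List (List Int)) (identificador : String) : List Int :=
  let q := if identificador != "linha" then pyZipStar quadrado else quadrado
  (PySem.List.enumerate q 0).foldl
    (fun soma il => soma.set il.1.toNat (soma.getD il.1.toNat 0 + il.2.sum))
    (List.replicate n.toNat 0)

-- ===== PRECONDITION & SPEC =====
-- Pre_ excludes inputs where A raises IndexError (negative n, or more rows/column entries than n)
-- and, for the column case, ragged matrices with rows of unequal length: there A's
-- accumulate-what-exists column sums and B's zip-truncated ones are both defensible readings of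
-- input the square-matrix task never specifies, and they differ.
def Pre_somar_linhas_colunas (n : Int) (quadrado : List (List Int)) (identificador : String) : Prop :=
  0 ≤ n ∧ (if identificador = "linha"
           then quadrado.length ≤ n.toNat
           else (∀ r ∈ quadrado, r.length ≤ n.toNat) ∧
                (∀ r ∈ quadrado, ∀ r' ∈ quadrado, r.length = r'.length))
instance (n : Int) (quadrado : List (List Int)) (identificador : String) : Decidable (Pre_somar_linhas_colunas n quadrado identificador) := by unfold Pre_somar_linhas_colunas; infer_instance

def pvWitness_somar_linhas_colunas : Int × List (List Int) × String := (2, [[1, 2], [3, 4]], "coluna")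

def Spec_somar_linhas_colunas (n : Int) (quadrado : List (List Int)) (identificador : String) (out : List Int) : Prop := out = somar_linhas_colunas_alt n quadrado identificador
instance (n : Int) (quadrado : List (List Int)) (identificador : String) (out : List Int) : Decidable (Spec_somar_linhas_colunas n quadrado identificador out) := by unfold Spec_somar_linhas_colunas; infer_instance

-- ===== CLAIM (what is proved, stated in full; the proofs are below) =====
def Claim_equal_somar_linhas_colunas : Prop := ∀ (n : Int) (quadrado : List (List Int)) (identificador : String), Dom_somar_linhas_colunas n quadrado identificador → Pre_somar_linhas_colunas n quadrado identificador → Spec_somar_linhas_colunas n quadrado identificador (somar_linhas_colunas n quadrado identificador)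

-- ===== LEMMAS AND PROOFS =====

lemma getD_set_self (s : List Int) (i : Nat) (v : Int) (h : i < s.length) :
    (s.set i v).getD i 0 = v := by
  rw [List.getD_eq_getElem _ _ (by simpa using h)]; simp

lemma getD_set_ne (s : List Int) (i j : Nat) (v : Int) (h : i ≠ j) :
    (s.set i v).getD j 0 = s.getD j 0 := by
  simp [List.getD, List.getElem?_set_ne h]

lemma foldl_set_add (l : List Int) (i : Nat) (s : List Int) (h : i < s.length) :
    l.foldl (fun s c => s.set i (s.getD i 0 + c)) s = s.set i (s.getD i 0 + l.sum) := by
  induction l generalizing s with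
  | nil => simp only [List.foldl_nil, List.sum_nil, add_zero]
           rw [List.getD_eq_getElem _ _ h]; exact (List.set_getElem_self h).symm
  | cons c t ih =>
    simp only [List.foldl_cons, List.sum_cons]
    rw [ih _ (by simpa using h), List.set_set, getD_set_self _ _ _ h]
    ring_nf

-- the nested inner loop of A's row branch is B's one-step accumulation, row by row
lemma fold_rows_eq (qs : List (List Int)) (k : Nat) (s : List Int) (h : k + qs.length ≤ s.length) :
    (PySem.List.enumerate qs (k : Int)).foldl
      (fun soma il => il.2.foldl (fun t c => t.set il.1.toNat (t.getD il.1.toNat 0 + c)) soma) s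
    = (PySem.List.enumerate qs (k : Int)).foldl
      (fun soma il => soma.set il.1.toNat (soma.getD il.1.toNat 0 + il.2.sum)) s := by
  induction qs generalizing k s with
  | nil => rfl
  | cons r t ih =>
    rw [PySem.List.enumerate_cons]
    simp only [List.foldl_cons, Int.toNat_natCast]
    have hk : k < s.length := by simp at h; omega
    rw [foldl_set_add r k s hk]
    have hk1 : ((k : Int) + 1) = ((k + 1 : Nat) : Int) := by push_cast; ring
    rw [hk1, ih (k + 1) _ (by simp at h ⊢; omega)]

-- characterization of B's accumulation fold
lemma fold_sum_char (qs : List (List Int)) (k : Nat) (s : List Int) (h : k + qs.length ≤ s.length) :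
    ((PySem.List.enumerate qs (k : Int)).foldl
      (fun soma il => soma.set il.1.toNat (soma.getD il.1.toNat 0 + il.2.sum)) s).length = s.length ∧
    ∀ j : Nat, ((PySem.List.enumerate qs (k : Int)).foldl
      (fun soma il => soma.set il.1.toNat (soma.getD il.1.toNat 0 + il.2.sum)) s).getD j 0
      = s.getD j 0 + (if k ≤ j ∧ j - k < qs.length then (qs.getD (j - k) []).sum else 0) := by
  induction qs generalizing k s with
  | nil =>
    refine ⟨by simp [PySem.List.enumerate], ?_⟩
    intro j
    rw [if_neg (by simp only [List.length_nil]; omega)]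
    simp [PySem.List.enumerate]
  | cons r t ih =>
    rw [PySem.List.enumerate_cons]
    simp only [List.foldl_cons, Int.toNat_natCast]
    have hk : k < s.length := by simp at h; omega
    have hk1 : ((k : Int) + 1) = ((k + 1 : Nat) : Int) := by push_cast; ring
    rw [hk1]
    obtain ⟨ihl, ihe⟩ := ih (k + 1) (s.set k (s.getD k 0 + r.sum)) (by simp at h ⊢; omega)
    refine ⟨by rw [ihl]; simp, ?_⟩
    intro j
    rw [ihe j]
    by_cases hjk : j = k
    · subst hjk
      rw [getD_set_self _ _ _ hk, if_neg (by omega),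
          if_pos ⟨le_refl _, by simp only [List.length_cons]; omega⟩]
      simp
    · rw [getD_set_ne _ _ _ _ (fun e => hjk e.symm)]
      congr 1
      by_cases hkj : k ≤ j
      · by_cases hlt : j - (k + 1) < t.length
        · rw [if_pos ⟨by omega, hlt⟩, if_pos ⟨hkj, by simp only [List.length_cons]; omega⟩]
          have : j - k = (j - (k + 1)) + 1 := by omega
          rw [this, List.getD_cons_succ]
        · rw [if_neg (by omega), if_neg (by simp only [List.length_cons]; omega)]
      · rw [if_neg (by omega), if_neg (by omega)]

lemma getD_replicate (n j : Nat) : (List.replicate n (0 : Int)).getD j 0 = 0 := by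
  simp [List.getD]

-- characterization of A's column branch: index j accumulates Σ over rows of r.getD j 0
lemma col_inner (l : List Int) (k : Nat) (s : List Int) (h : k + l.length ≤ s.length) :
    ((PySem.List.enumerate l (k : Nat)).foldl
        (fun t ic => t.set ic.1.toNat (t.getD ic.1.toNat 0 + ic.2)) s).length = s.length ∧
    ∀ j : Nat, ((PySem.List.enumerate l (k : Nat)).foldl
        (fun t ic => t.set ic.1.toNat (t.getD ic.1.toNat 0 + ic.2)) s).getD j 0
      = s.getD j 0 + (if k ≤ j ∧ j - k < l.length then l.getD (j - k) 0 else 0) := by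
  induction l generalizing k s with
  | nil =>
    refine ⟨by simp [PySem.List.enumerate], ?_⟩
    intro j
    rw [if_neg (by simp only [List.length_nil]; omega)]
    simp [PySem.List.enumerate]
  | cons c t ih =>
    rw [PySem.List.enumerate_cons]
    simp only [List.foldl_cons, Int.toNat_natCast]
    have hk : k < s.length := by simp at h; omega
    have hk1 : ((k : Int) + 1) = ((k + 1 : Nat) : Int) := by push_cast; ring
    rw [hk1]
    obtain ⟨ihl, ihe⟩ := ih (k + 1) (s.set k (s.getD k 0 + c)) (by simp at h ⊢; omega)
    refine ⟨by rw [ihl]; simp, ?_⟩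
    intro j
    rw [ihe j]
    by_cases hjk : j = k
    · subst hjk
      rw [getD_set_self _ _ _ hk, if_neg (by omega),
          if_pos ⟨le_refl _, by simp only [List.length_cons]; omega⟩]
      simp
    · rw [getD_set_ne _ _ _ _ (fun e => hjk e.symm)]
      congr 1
      by_cases hkj : k ≤ j
      · by_cases hlt : j - (k + 1) < t.length
        · rw [if_pos ⟨by omega, hlt⟩, if_pos ⟨hkj, by simp only [List.length_cons]; omega⟩]
          have : j - k = (j - (k + 1)) + 1 := by omega
          rw [this, List.getD_cons_succ]
        · rw [if_neg (by omega), if_neg (by simp only [List.length_cons]; omega)]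
      · rw [if_neg (by omega), if_neg (by omega)]

lemma col_outer (qs : List (List Int)) (s : List Int) (h : ∀ r ∈ qs, r.length ≤ s.length) :
    (qs.foldl (fun soma l => (PySem.List.enumerate l 0).foldl
        (fun t ic => t.set ic.1.toNat (t.getD ic.1.toNat 0 + ic.2)) soma) s).length = s.length ∧
    ∀ j : Nat, (qs.foldl (fun soma l => (PySem.List.enumerate l 0).foldl
        (fun t ic => t.set ic.1.toNat (t.getD ic.1.toNat 0 + ic.2)) soma) s).getD j 0
      = s.getD j 0 + (qs.map (fun r => r.getD j 0)).sum := by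
  induction qs generalizing s with
  | nil => exact ⟨rfl, by simp⟩
  | cons r t ih =>
    simp only [List.foldl_cons, List.map_cons, List.sum_cons]
    obtain ⟨il, ie⟩ := col_inner r 0 s (by simpa using h r (by simp))
    simp only [Nat.cast_zero] at il ie
    obtain ⟨ihl, ihe⟩ := ih _ (fun x hx => by rw [il]; exact h x (List.mem_cons_of_mem _ hx))
    refine ⟨by rw [ihl, il], ?_⟩
    intro j
    rw [ihe j, ie j]
    simp only [Nat.zero_le, Nat.sub_zero, true_and]
    by_cases hj : j < r.length
    · rw [if_pos hj]; ring
    · rw [if_neg hj, List.getD_eq_default r 0 (by omega)]; ring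

-- ===== VERDICT (by name: the statement is the Claim_ definition above) =====
theorem somar_linhas_colunas_spec : Claim_equal_somar_linhas_colunas := by
  intro n qs ident _ hpre
  obtain ⟨hn, hpre⟩ := hpre
  unfold Spec_somar_linhas_colunas somar_linhas_colunas somar_linhas_colunas_alt
  by_cases hid : ident = "linha"
  · rw [if_pos hid] at hpre
    simp only [hid, beq_self_eq_true, if_pos, bne_self_eq_false, Bool.false_eq_true, if_false]
    exact fold_rows_eq qs 0 _ (by simpa using hpre)
  · rw [if_neg hid] at hpre
    obtain ⟨hle, heq⟩ := hpre
    have h1 : (ident == "linha") = false := by simpa using hid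
    have h2 : (ident != "linha") = true := by simpa using hid
    simp only [h1, h2, Bool.false_eq_true, if_false, if_true]
    have hzlen : (pyZipStar qs).length ≤ n.toNat := by
      unfold pyZipStar
      cases hmin : (qs.map List.length).min? with
      | none => simp
      | some m =>
        have hm : m ∈ qs.map List.length := List.min?_mem hmin
        obtain ⟨r, hr, hrm⟩ := List.mem_map.mp hm
        simp only [List.length_map, List.length_range]
        exact hrm ▸ hle r hr
    obtain ⟨hl, he⟩ := col_outer qs (List.replicate n.toNat 0)
      (fun r hr => by simpa using hle r hr)
    obtain ⟨bl, be⟩ := fold_sum_char (pyZipStar qs) 0 (List.replicate n.toNat 0)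
      (by simpa using hzlen)
    simp only [Nat.cast_zero] at bl be
    apply List.ext_getElem
    · rw [hl, bl]
    · intro j hj1 hj2
      have hjn : j < n.toNat := by rw [hl] at hj1; simpa using hj1
      rw [← List.getD_eq_getElem _ 0 hj1, ← List.getD_eq_getElem _ 0 hj2, he j, be j]
      simp only [getD_replicate, Nat.zero_le, Nat.sub_zero, true_and, zero_add]
      cases qs with
      | nil => simp [pyZipStar]
      | cons r t =>
        have hall : ∀ x ∈ (t.map List.length), x = r.length := by
          intro x hx
          obtain ⟨r', hr', hx'⟩ := List.mem_map.mp hx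
          exact hx' ▸ heq r' (List.mem_cons_of_mem _ hr') r (by simp)
        have hmin : ((r :: t).map List.length).min? = some r.length := by
          rw [List.map_cons, List.min?_cons]
          cases hm : (t.map List.length).min? with
          | none => rfl
          | some m =>
            have := hall m (List.min?_mem hm)
            simp [this]
        have hz : pyZipStar (r :: t)
            = (List.range r.length).map (fun j => (r :: t).map (fun rr => rr.getD j 0)) := by
          unfold pyZipStar; rw [hmin]
        rw [hz]
        by_cases hjr : j < r.length
        · rw [if_pos (by simpa using hjr),
              List.getD_eq_getElem _ _ (by simpa using hjr)]
          simp
        · rw [if_neg (by simpa using hjr)]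
          have : ∀ rr ∈ (r :: t), rr.getD j 0 = 0 := by
            intro rr hrr
            have : rr.length = r.length := heq rr hrr r (by simp)
            exact List.getD_eq_default _ _ (by omega)
          rw [List.map_congr_left (fun x hx => this x hx)]
          simp
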